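-- pv_equiv track=rewrite | github.com/mentalblood0/drunk_snail | template_engine_re.py | fixIndent
-- ===== SOURCE A (Python) =====
-- def fixIndent(lines_without_semicolon, initial_indent=0):
-- 	result = []
-- 	current_indent = initial_indent
-- 	for line in lines_without_semicolon:
-- 		if line.endswith('end'):
-- 			current_indent -= 1
-- 			continue
-- 		elif line.endswith(':'):
-- 			result.append('\t' * current_indent + line)
-- 			current_indent += 1
-- 		else:
-- 			result.append('\t' * current_indent + line)
-- 	return result
-- ===== SOURCE B (Python) =====
-- def fixIndent(lines_without_semicolon, initial_indent=0):
-- 	# pass 1: per-line indent deltas (-1 for 'end', +1 for ':', 0 otherwise)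
-- 	deltas = [-1 if line.endswith('end') else (1 if line.endswith(':') else 0)
-- 	          for line in lines_without_semicolon]
-- 	# pass 2: exclusive prefix sums = indent level in effect at each line
-- 	levels = []
-- 	acc = initial_indent
-- 	for d in deltas:
-- 		levels.append(acc)
-- 		acc += d
-- 	# pass 3: render, dropping 'end' lines
-- 	return ['\t' * level + line
-- 	        for line, level in zip(lines_without_semicolon, levels)
-- 	        if not line.endswith('end')]
-- ===== Notes on version B (the rewrite author's own statement) =====
-- stated objective: alternative
-- what changed: Replaces the fused loop that mutates a running counter while appending with a three-pass pipeline: classify each line into a delta, take exclusive prefix sums to get per-line indent levels, then render by zip+filter.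
import Mathlib
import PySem

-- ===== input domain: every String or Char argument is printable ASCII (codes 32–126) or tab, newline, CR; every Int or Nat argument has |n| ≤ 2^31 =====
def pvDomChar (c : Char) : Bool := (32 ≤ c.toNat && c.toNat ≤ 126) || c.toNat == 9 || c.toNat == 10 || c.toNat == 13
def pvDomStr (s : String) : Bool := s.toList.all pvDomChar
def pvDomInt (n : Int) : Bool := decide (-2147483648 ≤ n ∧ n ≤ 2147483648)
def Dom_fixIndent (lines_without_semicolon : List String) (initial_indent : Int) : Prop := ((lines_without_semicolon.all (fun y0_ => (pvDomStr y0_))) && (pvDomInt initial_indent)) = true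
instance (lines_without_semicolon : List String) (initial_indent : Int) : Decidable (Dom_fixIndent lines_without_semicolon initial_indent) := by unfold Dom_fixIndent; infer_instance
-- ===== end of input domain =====

-- B replaces A's fused counter-mutating loop by a classify / prefix-sum / render pipeline (alternative decomposition, same cost).

-- '\t' * n in Python: empty for n ≤ 0 (Int.toNat clamps negatives to 0, which is exact here)
def pyTabs (n : Int) : String := String.ofList (List.replicate n.toNat '\t')

-- ===== PORT A =====
def fixIndent (lines_without_semicolon : List String) (initial_indent : Int) : List String :=
  (lines_without_semicolon.foldl
    (fun (st : List String × Int) line =>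
      if PySem.Str.endswith line "end" then (st.1, st.2 - 1)
      else if PySem.Str.endswith line ":" then (st.1 ++ [pyTabs st.2 ++ line], st.2 + 1)
      else (st.1 ++ [pyTabs st.2 ++ line], st.2))
    (([] : List String), initial_indent)).1

-- ===== PORT B =====
def lineDelta (line : String) : Int :=
  if PySem.Str.endswith line "end" then -1
  else if PySem.Str.endswith line ":" then 1
  else 0

def fixIndent_alt (lines_without_semicolon : List String) (initial_indent : Int) : List String :=
  let deltas := lines_without_semicolon.map lineDelta
  let levels := (deltas.foldl (fun (st : List Int × Int) d => (st.1 ++ [st.2], st.2 + d))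
    (([] : List Int), initial_indent)).1
  ((lines_without_semicolon.zip levels).filter
      (fun p => !PySem.Str.endswith p.1 "end")).map
    (fun p => pyTabs p.2 ++ p.1)

-- ===== PRECONDITION & SPEC =====
def Spec_fixIndent (lines_without_semicolon : List String) (initial_indent : Int) (out : List String) : Prop := out = fixIndent_alt lines_without_semicolon initial_indent
instance (lines_without_semicolon : List String) (initial_indent : Int) (out : List String) : Decidable (Spec_fixIndent lines_without_semicolon initial_indent out) := by unfold Spec_fixIndent; infer_instance

-- ===== CLAIM (what is proved, stated in full; the proofs are below) =====
def Claim_equal_fixIndent : Prop := ∀ (lines_without_semicolon : List String) (initial_indent : Int), Dom_fixIndent lines_without_semicolon initial_indent → Spec_fixIndent lines_without_semicolon initial_indent (fixIndent lines_without_semicolon initial_indent)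

-- ===== LEMMAS AND PROOFS =====

-- common recursive characterisation of the result
def goA : List String → Int → List String
  | [], _ => []
  | l :: ls, ind =>
    if PySem.Str.endswith l "end" then goA ls (ind - 1)
    else if PySem.Str.endswith l ":" then (pyTabs ind ++ l) :: goA ls (ind + 1)
    else (pyTabs ind ++ l) :: goA ls ind

-- exclusive prefix sums, the value of B's levels loop
def scanLv : List Int → Int → List Int
  | [], _ => []
  | d :: ds, i => i :: scanLv ds (i + d)

theorem foldlA_eq_goA (ls : List String) (res : List String) (ind : Int) :
    (ls.foldl
      (fun (st : List String × Int) line =>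
        if PySem.Str.endswith line "end" then (st.1, st.2 - 1)
        else if PySem.Str.endswith line ":" then (st.1 ++ [pyTabs st.2 ++ line], st.2 + 1)
        else (st.1 ++ [pyTabs st.2 ++ line], st.2))
      (res, ind)).1 = res ++ goA ls ind := by
  induction ls generalizing res ind with
  | nil => simp [goA]
  | cons l ls ih =>
    simp only [List.foldl_cons, goA]
    by_cases h1 : PySem.Str.endswith l "end" = true
    · simp only [h1, if_true]; rw [ih]
    · by_cases h2 : PySem.Str.endswith l ":" = true
      · simp only [h1, h2, Bool.false_eq_true, if_false, if_true]
        rw [ih, List.append_assoc, List.singleton_append]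
      · simp only [h1, h2, Bool.false_eq_true, if_false]
        rw [ih, List.append_assoc, List.singleton_append]

theorem foldlL_eq_scanLv (ds : List Int) (acc : List Int) (ind : Int) :
    (ds.foldl (fun (st : List Int × Int) d => (st.1 ++ [st.2], st.2 + d)) (acc, ind)).1
      = acc ++ scanLv ds ind := by
  induction ds generalizing acc ind with
  | nil => simp [scanLv]
  | cons d ds ih => simp [scanLv, ih]

theorem render_eq_goA (ls : List String) (ind : Int) :
    ((ls.zip (scanLv (ls.map lineDelta) ind)).filter
        (fun p => !PySem.Str.endswith p.1 "end")).map
      (fun p => pyTabs p.2 ++ p.1) = goA ls ind := by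
  induction ls generalizing ind with
  | nil => simp [scanLv, goA]
  | cons l ls ih =>
    simp only [List.map_cons, scanLv, List.zip_cons_cons, List.filter_cons, goA, lineDelta]
    by_cases h1 : PySem.Str.endswith l "end" = true
    · simp only [h1, Bool.not_true, Bool.false_eq_true, if_false, if_true]
      rw [ih, Int.sub_eq_add_neg]
    · by_cases h2 : PySem.Str.endswith l ":" = true
      · simp only [h1, h2, Bool.false_eq_true, if_false, if_true, Bool.not_false,
          List.map_cons]
        rw [ih]
      · simp only [h1, h2, Bool.false_eq_true, if_false, Bool.not_false, if_true,
          List.map_cons]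
        rw [Int.add_zero, ih]

-- ===== VERDICT (by name: the statement is the Claim_ definition above) =====
theorem fixIndent_spec : Claim_equal_fixIndent := by
  intro ls ind _
  unfold Spec_fixIndent fixIndent fixIndent_alt
  simp only [foldlA_eq_goA, foldlL_eq_scanLv, render_eq_goA, List.nil_append]
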